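/-
  GENERATED by c/gen_symbols.py from toy.sym (the PROGRAM only (the base is in the shared library)) — do not edit; re-run the script when the image is re-linked.

  `Symbols`: one number per symbol of the image. `symbols`: this build. `Symbols.rt`: the runtime's entry points as the
  parameter record of Asan/Runtime.lean. `Symbols.image`: the `Image` for given file bytes.
-/
import Asan.Runtime
import ProgX.Base.Symbols
import ProgX.Start
namespace Toy

/-- The symbols of the image (`nm`): functions, named objects, section marks. -/
structure Symbols where
  /-- `clamp_length`: function (static), 27 bytes -/
  clamp_length : Nat
  /-- `weighted_sum`: function (static), 98 bytes -/
  weighted_sum : Nat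
  /-- `store_sum`: function (static), 69 bytes -/
  store_sum : Nat
  /-- `fill_buffer`: function (static), 48 bytes -/
  fill_buffer : Nat
  /-- `_sub_I_65535_1`: function (static), 24 bytes -/
  sub_I_65535_1 : Nat
  /-- `__text_end`: function -/
  text_end : Nat
  /-- `__rodata_start`: read-only mark / object -/
  rodata_start : Nat
  /-- `weights`: read-only object (static), 4 bytes -/
  weights : Nat
  /-- `__rodata_end`: read-only mark / object -/
  rodata_end : Nat
  /-- `__data_start`: data mark / object -/
  data_start : Nat
  /-- `fill_byte`: data mark / object, 1 bytes -/
  fill_byte : Nat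
  /-- `__data_end`: data mark / object -/
  data_end : Nat
  /-- `__bss_start`: bss mark / object -/
  bss_start : Nat
  /-- `calls`: bss object (static), 8 bytes -/
  calls : Nat
  /-- `__bss_end`: bss mark / object -/
  bss_end : Nat
  /-- `__image_end`: bss mark / object -/
  image_end : Nat

/-- The addresses of this build (toy.sym). -/
def symbols : Symbols where
  clamp_length := 0x105180
  weighted_sum := 0x105220
  store_sum := 0x105320
  fill_buffer := 0x105400
  sub_I_65535_1 := 0x1054c0
  text_end := 0x105560
  rodata_start := 0x141100
  weights := 0x141200
  rodata_end := 0x141360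
  data_start := 0x141800
  fill_byte := 0x141800
  data_end := 0x1419c0
  bss_start := 0x141c00
  calls := 0x141c00
  bss_end := 0x141c40
  image_end := 0x141c40

/-- The runtime's entry points, for the contracts of Asan/Runtime.lean. -/
def Symbols.rt (S : Symbols) : Asan.RtSymbols where
  report := UInt64.ofNat ProgX.Base.symbols.asan_report
  rangeBad := UInt64.ofNat ProgX.Base.symbols.range_bad
  load1 := UInt64.ofNat ProgX.Base.symbols.asan_load1_noabort
  store1 := UInt64.ofNat ProgX.Base.symbols.asan_store1_noabort
  load2 := UInt64.ofNat ProgX.Base.symbols.asan_load2_noabort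
  store2 := UInt64.ofNat ProgX.Base.symbols.asan_store2_noabort
  load4 := UInt64.ofNat ProgX.Base.symbols.asan_load4_noabort
  store4 := UInt64.ofNat ProgX.Base.symbols.asan_store4_noabort
  load8 := UInt64.ofNat ProgX.Base.symbols.asan_load8_noabort
  store8 := UInt64.ofNat ProgX.Base.symbols.asan_store8_noabort
  load16 := UInt64.ofNat ProgX.Base.symbols.asan_load16_noabort
  store16 := UInt64.ofNat ProgX.Base.symbols.asan_store16_noabort
  storeN := UInt64.ofNat ProgX.Base.symbols.asan_storeN_noabort
  arenaUnpoison := UInt64.ofNat ProgX.Base.symbols.arena_unpoison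
  arenaPoison := UInt64.ofNat ProgX.Base.symbols.arena_poison
  registerGlobals := UInt64.ofNat ProgX.Base.symbols.asan_register_globals
  ctor := UInt64.ofNat S.sub_I_65535_1
  runCtors := UInt64.ofNat ProgX.Base.symbols.run_ctors
  initArrayStart := ProgX.Base.symbols.init_array_start
  initArrayEnd := ProgX.Base.symbols.init_array_end

/-- The `Image` of ProgX/Start.lean for the file bytes `bytes` (toy.bin) and these symbols. -/
def Symbols.image (S : Symbols) (bytes : Array UInt8) : ProgX.Image where
  bytes := bytes
  imageEnd := S.image_end
  textEnd := ProgX.Base.symbols.text_cap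
  entry := UInt64.ofNat ProgX.Base.symbols.start
  exit := UInt64.ofNat ProgX.Base.symbols.prog_exit
  report := UInt64.ofNat ProgX.Base.symbols.asan_report

end Toy
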